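-- pv_equiv track=rewrite | github.com/Divyanjali110/codemind-python | Minimum_digit_elements.py | count_elements_with_minimum_digits
-- ===== SOURCE A (Python) =====
-- def count_elements_with_minimum_digits(arr):
--     min_digits = float('inf')
--     count = 0
--
--     for num in arr:
--         num_digits = len(str(num))
--         if num_digits < min_digits:
--             min_digits = num_digits
--             count = 1
--         elif num_digits == min_digits:
--             count += 1
--
--     return count
-- ===== SOURCE B (Python) =====
-- def count_elements_with_minimum_digits(arr):
--     digits = [len(str(num)) for num in arr]
--     if not digits:
--         return 0
--     m = min(digits)
--     return digits.count(m)
-- ===== Notes on version B (the rewrite author's own statement) =====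
-- stated objective: simpler
-- what changed: Replaces the online min-tracking loop with conditional count reset by building the digit-length table once, then taking min and count of that table.
import Mathlib
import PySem

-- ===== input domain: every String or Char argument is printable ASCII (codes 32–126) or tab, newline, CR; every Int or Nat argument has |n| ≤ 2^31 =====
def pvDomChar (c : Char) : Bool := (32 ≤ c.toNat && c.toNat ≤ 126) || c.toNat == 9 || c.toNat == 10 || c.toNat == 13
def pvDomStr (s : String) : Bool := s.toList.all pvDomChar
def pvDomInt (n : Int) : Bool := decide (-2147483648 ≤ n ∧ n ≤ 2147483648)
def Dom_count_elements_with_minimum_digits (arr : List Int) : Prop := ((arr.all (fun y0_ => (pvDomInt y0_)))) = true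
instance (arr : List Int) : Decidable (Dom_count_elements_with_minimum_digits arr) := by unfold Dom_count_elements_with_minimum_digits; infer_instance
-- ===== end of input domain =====

-- B builds the digit-length table once and returns min's count in it, instead of A's
-- online min-tracking loop: same cost, plainer decomposition (objective: simpler).

-- len(str(num)) as Int, used by both ports
def pvDigits (num : Int) : Int := (PySem.Str.len (PySem.Int.toStr num) : Int)

-- ===== PORT A =====
-- A's for-loop with state (min_digits, count); min_digits = none plays float('inf')
def pvALoop : List Int → Option Int × Int → Int
  | [], (_, c) => c
  | num :: rest, (md, c) =>
    let nd : Int := pvDigits num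
    match md with
    | none => pvALoop rest (some nd, 1)          -- num_digits < inf
    | some m =>
      if nd < m then pvALoop rest (some nd, 1)
      else if nd = m then pvALoop rest (some m, c + 1)
      else pvALoop rest (some m, c)

def count_elements_with_minimum_digits (arr : List Int) : Int :=
  pvALoop arr (none, 0)

-- ===== PORT B =====
def count_elements_with_minimum_digits_alt (arr : List Int) : Int :=
  let digits : List Int := arr.map pvDigits
  match PySem.List.min? digits (fun x => x) with   -- empty → 0, else min(digits)
  | none => 0
  | some m => (digits.count m : Int)

-- ===== PRECONDITION & SPEC =====
def Spec_count_elements_with_minimum_digits (arr : List Int) (out : Int) : Prop := out = count_elements_with_minimum_digits_alt arr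
instance (arr : List Int) (out : Int) : Decidable (Spec_count_elements_with_minimum_digits arr out) := by unfold Spec_count_elements_with_minimum_digits; infer_instance

-- ===== CLAIM (what is proved, stated in full; the proofs are below) =====
def Claim_equal_count_elements_with_minimum_digits : Prop := ∀ (arr : List Int), Dom_count_elements_with_minimum_digits arr → Spec_count_elements_with_minimum_digits arr (count_elements_with_minimum_digits arr)

-- ===== LEMMAS AND PROOFS =====

-- characterisation of A's loop from a concrete (some m, c) state
lemma pvALoop_some (l : List Int) (m c : Int) :
    pvALoop l (some m, c) =
      (if (l.map pvDigits).foldl min m < m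
       then (((l.map pvDigits).count ((l.map pvDigits).foldl min m) : Nat) : Int)
       else c + ((l.map pvDigits).count m : Int)) := by
  induction l generalizing m c with
  | nil => simp [pvALoop]
  | cons x t ih =>
    have hle : ∀ (a : Int), (t.map pvDigits).foldl min a ≤ a :=
      fun a => (PySem.List.foldl_min_le (t.map pvDigits) a).1
    simp only [pvALoop, List.map_cons, List.foldl_cons, List.count_cons]
    by_cases h1 : pvDigits x < m
    · rw [if_pos h1, ih]
      have hmin : min m (pvDigits x) = pvDigits x := by omega
      rw [hmin]
      by_cases h2 : (t.map pvDigits).foldl min (pvDigits x) < pvDigits x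
      · rw [if_pos h2, if_pos (by omega)]
        have hne : ¬ (pvDigits x == (t.map pvDigits).foldl min (pvDigits x)) := by
          simp; omega
        simp [hne]
      · have heq : (t.map pvDigits).foldl min (pvDigits x) = pvDigits x := by
          have := hle (pvDigits x); omega
        rw [if_neg h2, if_pos (by omega)]
        simp [heq]; omega
    · rw [if_neg h1]
      by_cases h2 : pvDigits x = m
      · rw [if_pos h2, ih, h2]
        simp only [min_self]
        by_cases h3 : (t.map pvDigits).foldl min m < m
        · rw [if_pos h3, if_pos h3]
          have hne : ¬ (m == (t.map pvDigits).foldl min m) := by simp; omega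
          simp [hne]
        · rw [if_neg h3, if_neg h3]; simp; omega
      · rw [if_neg h2, ih]
        have hmin : min m (pvDigits x) = m := by omega
        rw [hmin]
        by_cases h3 : (t.map pvDigits).foldl min m < m
        · rw [if_pos h3, if_pos h3]
          have hlem := hle m
          have hne : ¬ (pvDigits x == (t.map pvDigits).foldl min m) := by simp; omega
          simp [hne]
        · rw [if_neg h3, if_neg h3]
          have hne : ¬ (pvDigits x == m) := by simp; omega
          simp [hne]

theorem count_elements_with_minimum_digits_spec : Claim_equal_count_elements_with_minimum_digits := by
  intro arr _
  unfold Spec_count_elements_with_minimum_digits count_elements_with_minimum_digits count_elements_with_minimum_digits_alt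
  cases arr with
  | nil => simp [pvALoop, PySem.List.min?]
  | cons x t =>
    simp only [pvALoop, List.map_cons]
    rw [pvALoop_some, PySem.List.min?_id_cons]
    have hle : (t.map pvDigits).foldl min (pvDigits x) ≤ pvDigits x :=
      (PySem.List.foldl_min_le (t.map pvDigits) (pvDigits x)).1
    by_cases h : (t.map pvDigits).foldl min (pvDigits x) < pvDigits x
    · rw [if_pos h]
      have hne : ¬ (pvDigits x == (t.map pvDigits).foldl min (pvDigits x)) := by
        simp; omega
      simp [List.count_cons, hne]
    · have heq : (t.map pvDigits).foldl min (pvDigits x) = pvDigits x := by omega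
      rw [if_neg h, heq]
      simp; omega
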